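-- pv_equiv track=rewrite | github.com/tehhuu/Atcoder | ABC/110/110-C2.py | norm_s
-- ===== SOURCE A (Python) =====
-- def norm_s(S):
--     num = 97
--     al_dict = {}
--     new = ''
--     for i, moji in enumerate(S):
--         if moji not in al_dict:
--             al_dict[moji] = i
--             new += chr(num)
--             num += 1
--         else:
--             new += new[al_dict[moji]]
--
--     return new
-- ===== SOURCE B (Python) =====
-- def norm_s(S):
--     # closed form per distinct character: its letter is chr(97 + number of
--     # distinct characters occurring strictly before its first occurrence
--     letter = {c: chr(97 + len(set(S[:S.index(c)]))) for c in set(S)}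
--     return ''.join(letter[c] for c in S)
-- ===== Notes on version B (the rewrite author's own statement) =====
-- stated objective: alternative
-- what changed: Replaces A's single stateful pass (a growing dict of first-occurrence indices plus back-indexing into the partially built output new[al_dict[c]] and a running letter counter) with a stateless closed form: each distinct character's letter is chr(97 + len(set(S[:S.index(c)]))), tabulated once over set(S) and then applied; no incremental counter or partial-output indexing.
import Mathlib
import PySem

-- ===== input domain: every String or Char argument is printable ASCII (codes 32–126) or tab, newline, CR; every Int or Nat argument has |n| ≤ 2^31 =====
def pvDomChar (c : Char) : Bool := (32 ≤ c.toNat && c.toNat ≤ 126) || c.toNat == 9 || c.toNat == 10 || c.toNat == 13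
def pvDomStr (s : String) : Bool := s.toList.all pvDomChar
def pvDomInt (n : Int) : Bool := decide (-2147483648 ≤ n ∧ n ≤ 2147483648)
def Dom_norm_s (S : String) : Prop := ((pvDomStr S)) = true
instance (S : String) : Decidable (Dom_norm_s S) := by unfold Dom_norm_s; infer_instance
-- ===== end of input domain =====

-- B replaces A's interleaved dict+back-indexing pass by a per-character closed form:
-- each character's letter is 97 + the number of distinct characters before its first occurrence.


-- ===== PORT A =====
-- loop body of A: state (num, al_dict, new); al_dict maps a char to its first-occurrence index
def normAStep (st : Int × PySem.Dict Char Int × List Char) (p : Int × Char) :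
    Int × PySem.Dict Char Int × List Char :=
  if st.2.1.contains p.2 = false then
    (st.1 + 1, st.2.1.insert p.2 p.1, st.2.2 ++ [Char.ofNat st.1.toNat])
  else
    -- new[al_dict[moji]]: the index is always in range, so Python never raises; the 'a' default is dead code
    (st.1, st.2.1, st.2.2 ++ [(PySem.List.pyGet? st.2.2 (st.2.1.getD p.2 0)).getD 'a'])

def norm_s (S : String) : String :=
  String.ofList ((PySem.List.enumerate S.toList 0).foldl normAStep
    (97, PySem.Dict.empty, [])).2.2

-- ===== PORT B =====
-- chr(97 + len(set(S[:S.index(c)]))); S.index(c) never raises since c is drawn from S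
def normBLetter (l : List Char) (c : Char) : Char :=
  Char.ofNat (97 +
    (PySem.Set.ofList (PySem.List.slice l none
      (some (((PySem.List.index? l c).getD 0 : Nat) : Int)))).length)

-- letter = {c: chr(97+len(set(S[:S.index(c)]))) for c in set(S)}; the result only LOOKS UP
-- this dict, so its value is independent of Python's set iteration order (ported in
-- first-occurrence order). letter[c] never raises (every c of S is a key): 'a' default is dead code
def norm_s_alt (S : String) : String :=
  let letter := (PySem.Set.ofList S.toList).foldl
    (fun d c => d.insert c (normBLetter S.toList c)) PySem.Dict.empty
  String.ofList (S.toList.map (fun c => letter.getD c 'a'))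

-- ===== PRECONDITION & SPEC =====
def Spec_norm_s (S : String) (out : String) : Prop := out = norm_s_alt S
instance (S : String) (out : String) : Decidable (Spec_norm_s S out) := by unfold Spec_norm_s; infer_instance

-- ===== CLAIM (what is proved, stated in full; the proofs are below) =====
def Claim_equal_norm_s : Prop := ∀ (S : String), Dom_norm_s S → Spec_norm_s S (norm_s S)

-- ===== LEMMAS AND PROOFS =====

-- the closed form of B at a character not yet seen: its first occurrence is right here
theorem normBLetter_fresh (pref rest : List Char) (c : Char) (hc : c ∉ pref) :
    normBLetter (pref ++ c :: rest) c = Char.ofNat (97 + (PySem.Set.ofList pref).length) := by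
  have hidx : PySem.List.index? (pref ++ c :: rest) c = some pref.length := by
    rw [PySem.List.index?_eq_some_iff]
    exact ⟨pref, rest, rfl, rfl, hc⟩
  unfold normBLetter
  rw [hidx]
  simp only [Option.getD_some]
  rw [PySem.List.slice_to_natCast, List.take_left]

-- A's loop over the remaining suffix, with the processed prefix's state characterised
theorem norm_loop_eq (rest : List Char) (l pref : List Char) (hl : l = pref ++ rest)
    (num : Int) (d : PySem.Dict Char Int) (new : List Char)
    (h1 : num = 97 + ((PySem.Set.ofList pref).length : Int))
    (h2 : ∀ c, d.get? c = (PySem.List.index? pref c).map (fun n => (n : Int)))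
    (h3 : new = pref.map (normBLetter l)) :
    ((PySem.List.enumerate rest (pref.length : Int)).foldl normAStep (num, d, new)).2.2
      = l.map (normBLetter l) := by
  induction rest generalizing pref num d new with
  | nil =>
    rw [List.append_nil] at hl
    subst hl
    simpa [PySem.List.enumerate] using h3
  | cons c rest ih =>
    rw [PySem.List.enumerate_cons, List.foldl_cons]
    by_cases hc : c ∈ pref
    · -- seen before: else branch, A copies new[al_dict[c]]
      obtain ⟨n, hn⟩ : ∃ n, PySem.List.index? pref c = some n :=
        Option.isSome_iff_exists.mp ((PySem.List.index?_isSome_iff pref c).2 hc)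
      obtain ⟨hk, hget, -⟩ := PySem.List.getElem_of_index?_eq_some hn
      have hcont : d.contains c = true := by
        rw [PySem.Dict.contains_eq_isSome_get?, h2, hn]; rfl
      have hgd : d.getD c 0 = (n : Int) := by
        rw [PySem.Dict.getD_eq_get?_getD, h2, hn]; rfl
      have hstep : normAStep (num, d, new) ((pref.length : Int), c)
          = (num, d, new ++ [normBLetter l c]) := by
        unfold normAStep
        rw [hcont, if_neg (by simp)]
        rw [hgd, PySem.List.pyGet?_natCast, h3, List.getElem?_map,
          List.getElem?_eq_getElem hk, hget]
        rfl
      rw [hstep]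
      have hset : PySem.Set.ofList (pref ++ [c]) = PySem.Set.ofList pref := by
        rw [PySem.Set.ofList_append_singleton,
          PySem.Set.add_of_mem ((PySem.Set.mem_ofList pref c).2 hc)]
      have h2' : ∀ c', d.get? c' = (PySem.List.index? (pref ++ [c]) c').map (fun n => (n : Int)) := by
        intro c'
        by_cases hc' : c' ∈ pref
        · rw [PySem.List.index?_append_of_mem _ hc', h2]
        · rw [h2, (PySem.List.index?_eq_none_iff pref c').2 hc',
            (PySem.List.index?_eq_none_iff (pref ++ [c]) c').2 (by
              intro hmem
              rcases List.mem_append.1 hmem with h | h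
              · exact hc' h
              · simp at h; exact hc' (h ▸ hc))]
      have := ih (pref ++ [c])
        (by rw [hl]; simp) num d (new ++ [normBLetter l c])
        (by rw [hset]; exact h1) h2'
        (by rw [h3, List.map_append]; rfl)
      rw [List.length_append, List.length_singleton] at this
      push_cast at this
      exact this
    · -- unseen: then branch, A assigns the next letter and records the index
      have hcont : d.contains c = false := by
        rw [PySem.Dict.contains_eq_isSome_get?, h2,
          (PySem.List.index?_eq_none_iff pref c).2 hc]; rfl
      have hstep : normAStep (num, d, new) ((pref.length : Int), c)
          = (num + 1, d.insert c (pref.length : Int), new ++ [Char.ofNat num.toNat]) := by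
        unfold normAStep
        rw [hcont, if_pos rfl]
      rw [hstep]
      have hchr : Char.ofNat num.toNat = normBLetter l c := by
        rw [hl, normBLetter_fresh pref rest c hc]
        congr 1
        omega
      have hset : PySem.Set.ofList (pref ++ [c]) = PySem.Set.ofList pref ++ [c] := by
        rw [PySem.Set.ofList_append_singleton,
          PySem.Set.add_of_not_mem (fun h => hc ((PySem.Set.mem_ofList pref c).1 h))]
      have h2' : ∀ c', (d.insert c (pref.length : Int)).get? c'
          = (PySem.List.index? (pref ++ [c]) c').map (fun n => (n : Int)) := by
        intro c'
        by_cases he : c' = c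
        · subst he
          rw [PySem.Dict.get?_insert_self, PySem.List.index?_append_singleton_self pref c' hc]
          rfl
        · rw [PySem.Dict.get?_insert_of_ne _ _ he, h2]
          by_cases hc' : c' ∈ pref
          · rw [PySem.List.index?_append_of_mem _ hc']
          · rw [(PySem.List.index?_eq_none_iff pref c').2 hc',
              (PySem.List.index?_eq_none_iff (pref ++ [c]) c').2 (by
                intro hmem
                rcases List.mem_append.1 hmem with h | h
                · exact hc' h
                · simp at h; exact he h)]
      have := ih (pref ++ [c])
        (by rw [hl]; simp) (num + 1) (d.insert c (pref.length : Int))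
        (new ++ [Char.ofNat num.toNat])
        (by rw [hset]; simp; omega) h2'
        (by rw [h3, List.map_append, hchr]; rfl)
      rw [List.length_append, List.length_singleton] at this
      push_cast at this
      exact this

-- B's memo dict just tabulates the closed form on the distinct characters
theorem letter_getD (l : List Char) (c : Char) (hc : c ∈ l) :
    ((PySem.Set.ofList l).foldl (fun d c => d.insert c (normBLetter l c))
        PySem.Dict.empty).getD c 'a' = normBLetter l c := by
  have hitems := PySem.Dict.items_foldl_insert_fresh (PySem.Set.ofList l)
    (fun x => x) (fun x => normBLetter l x) PySem.Dict.empty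
    (by intro a _; rw [PySem.Dict.contains_empty])
    (by simpa using PySem.Set.nodup_ofList l)
  refine PySem.Dict.getD_of_mem_items _ ?_ ?_ 'a'
  · rw [hitems]
    simp only [PySem.Dict.items, PySem.Dict.empty, List.nil_append, List.mem_map]
    exact ⟨c, (PySem.Set.mem_ofList l c).2 hc, rfl⟩
  · exact PySem.Dict.nodup_keys_foldl_insert _ _ _ (by simp [PySem.Dict.keys, PySem.Dict.empty, PySem.Dict.items])

-- ===== VERDICT (by name: the statement is the Claim_ definition above) =====
theorem norm_s_spec : Claim_equal_norm_s := by
  intro S _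
  unfold Spec_norm_s norm_s norm_s_alt
  have h := norm_loop_eq S.toList S.toList [] rfl 97 PySem.Dict.empty []
    (by simp [PySem.Set.ofList])
    (by intro c; simp [PySem.Dict.get?_empty, PySem.List.index?])
    rfl
  simp only [List.length_nil, Nat.cast_zero] at h
  rw [h]
  exact congrArg String.ofList (List.map_congr_left
    (fun c hc => (letter_getD S.toList c hc).symm))
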